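-- pv_equiv track=rewrite | github.com/SofiaNovomodna/prg-basics | 04-Functions/7-23.py | f
-- ===== SOURCE A (Python) =====
-- def f(password):
--     for char in password:
--         count = password.count(char)
--         if count >1:
--             return False
--     if len(password)<6:
--         return False
--     return True
-- ===== SOURCE B (Python) =====
-- def f(password):
--     s = sorted(password)
--     for a, b in zip(s, s[1:]):
--         if a == b:
--             return False
--     return len(password) >= 6
-- ===== Notes on version B (the rewrite author's own statement) =====
-- stated objective: alternative
-- what changed: Detects duplicates via a sort plus one adjacent-pair comparison pass instead of A's per-character full-string .count scans; it trades A's early exit on the first repeated character for a single ordered scan.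
import Mathlib
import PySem

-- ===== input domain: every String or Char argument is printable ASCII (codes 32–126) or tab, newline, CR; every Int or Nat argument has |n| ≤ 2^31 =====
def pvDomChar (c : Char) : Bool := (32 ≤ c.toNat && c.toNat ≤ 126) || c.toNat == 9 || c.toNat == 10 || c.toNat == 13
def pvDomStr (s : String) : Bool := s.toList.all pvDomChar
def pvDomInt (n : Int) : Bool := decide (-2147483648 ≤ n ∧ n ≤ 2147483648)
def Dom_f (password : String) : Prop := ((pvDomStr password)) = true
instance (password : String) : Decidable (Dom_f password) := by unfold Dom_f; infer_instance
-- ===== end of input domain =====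

-- B detects duplicates by sorting once and scanning adjacent pairs, instead of A's
-- per-character full-string count scans; return value unchanged.

-- ===== PORT A =====
-- the for-loop of A: for each char, count it in the whole string; early-return False on a
-- duplicate; after the loop, the length test.  password.count(c) for a 1-char c is the
-- character count, PySem.List.count.
def fLoopA (pw : List Char) : List Char → Bool
  | [] => if pw.length < 6 then false else true
  | c :: rest => if PySem.List.count pw c > 1 then false else fLoopA pw rest

def f (password : String) : Bool := fLoopA password.toList password.toList

-- ===== PORT B =====
-- the zip(s, s[1:]) loop of Source B: walk adjacent pairs, early-return False on an equal pair
def adjScanB : List Char → Bool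
  | a :: b :: rest => if a == b then false else adjScanB (b :: rest)
  | _ => true

def f_alt (password : String) : Bool :=
  let s := PySem.List.sorted password.toList (fun x => x) false
  if adjScanB s then decide (6 ≤ password.toList.length) else false

-- ===== PRECONDITION & SPEC =====
def Spec_f (password : String) (out : Bool) : Prop := out = f_alt password
instance (password : String) (out : Bool) : Decidable (Spec_f password out) := by unfold Spec_f; infer_instance

-- ===== CLAIM (what is proved, stated in full; the proofs are below) =====
def Claim_equal_f : Prop := ∀ (password : String), Dom_f password → Spec_f password (f password)

-- ===== LEMMAS AND PROOFS =====

-- A's loop characterised: False iff some scanned char occurs more than once in pw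
theorem fLoopA_eq (pw : List Char) (l : List Char) :
    fLoopA pw l = ((decide (∀ c ∈ l, pw.count c ≤ 1)) && !(decide (pw.length < 6))) := by
  induction l with
  | nil => simp [fLoopA]
  | cons c rest ih =>
    simp only [fLoopA, PySem.List.count_eq]
    by_cases h : pw.count c > 1
    · simp [h]
    · have h1 : pw.count c ≤ 1 := by omega
      simp [h, ih, h1]

theorem f_eq (password : String) :
    f password = ((decide password.toList.Nodup) && !(decide (password.toList.length < 6))) := by
  show fLoopA password.toList password.toList = _
  rw [fLoopA_eq]
  have hiff : (∀ c ∈ password.toList, password.toList.count c ≤ 1) ↔ password.toList.Nodup := by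
    rw [List.nodup_iff_count_le_one]
    constructor
    · intro hh a
      by_cases hm : a ∈ password.toList
      · exact hh a hm
      · simp [List.count_eq_zero_of_not_mem hm]
    · exact fun hh c _ => hh c
  rw [decide_eq_decide.mpr hiff]

-- B's adjacent scan characterised: True iff no two adjacent elements are equal
theorem adjScanB_eq_isChain (l : List Char) :
    adjScanB l = true ↔ l.IsChain (· ≠ ·) := by
  induction l with
  | nil => simp [adjScanB]
  | cons a rest ih =>
    cases rest with
    | nil => simp [adjScanB]
    | cons b t =>
      by_cases h : a = b
      · simp [adjScanB, h]
      · simp [adjScanB, h, ih, Ne, List.isChain_cons_cons]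

theorem isChain_and {α : Type} {R S : α → α → Prop} :
    ∀ (l : List α), l.IsChain R → l.IsChain S → l.IsChain (fun a b => R a b ∧ S a b)
  | [], _, _ => by simp
  | [_], _, _ => by simp
  | a :: b :: t, hR, hS => by
      rw [List.isChain_cons_cons] at hR hS ⊢
      exact ⟨⟨hR.1, hS.1⟩, isChain_and (b :: t) hR.2 hS.2⟩

-- on a ≤-sorted list, no equal adjacent pair ↔ no duplicates at all
theorem adjScanB_sorted_eq_nodup (l : List Char)
    (hs : l.Pairwise (fun a b => a ≤ b)) :
    adjScanB l = decide l.Nodup := by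
  by_cases h : l.Nodup
  · simp only [h, decide_true, adjScanB_eq_isChain]
    exact List.Pairwise.isChain h
  · simp only [h, decide_false]
    by_contra ht
    have hchain : l.IsChain (· ≠ ·) := (adjScanB_eq_isChain l).mp (by simpa using ht)
    have hle : l.IsChain (fun a b => a ≤ b) := List.Pairwise.isChain hs
    have hlt : l.IsChain (fun a b : Char => a < b) :=
      (isChain_and l hle hchain).imp fun {a b} hab => lt_of_le_of_ne hab.1 hab.2
    exact h ((List.isChain_iff_pairwise.mp hlt).imp fun hab => ne_of_lt hab)

theorem not_decide_lt_six (n : Nat) : (!decide (n < 6)) = decide (6 ≤ n) := by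
  by_cases hn : n < 6
  · have : ¬ 6 ≤ n := by omega
    simp [hn, this]
  · have : 6 ≤ n := by omega
    simp [hn, this]

-- ===== VERDICT (by name: the statement is the Claim_ definition above) =====
theorem f_spec : Claim_equal_f := by
  intro password _
  unfold Spec_f f_alt
  rw [f_eq]
  have hperm := PySem.List.sorted_perm password.toList (fun x : Char => x) false
  have hnd : (PySem.List.sorted password.toList (fun x : Char => x) false).Nodup ↔
      password.toList.Nodup := hperm.nodup_iff
  show _ = if adjScanB (PySem.List.sorted password.toList (fun x => x) false) = true
    then decide (6 ≤ password.toList.length) else false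
  rw [adjScanB_sorted_eq_nodup _ (PySem.List.sorted_pairwise ..)]
  by_cases h : password.toList.Nodup
  · simp only [hnd.mpr h, h, decide_true, if_true, Bool.true_and]
    exact not_decide_lt_six _
  · simp [h, hnd.not.mpr h]
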